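-- pv_equiv track=rewrite | github.com/Kimdonghyeon7645/Problem-Solving | 프로그래머스/프로그래머스 Level 1/둘만의 암호.py | solution
-- ===== SOURCE A (Python) =====
-- def solution(s, skip, index):
--     r = ""
--     for c in s:
--         i = j = 0
--         while i < index:
--             j += 1
--             if chr(97+((ord(c)+j-97)%26)) not in skip:
--                 i += 1
--         r += chr(97+((ord(c)+j-97)%26))
--     return r
-- ===== SOURCE B (Python) =====
-- def solution(s, skip, index):
--     out = []
--     for c in s:
--         p = (ord(c) - 97) % 26
--         if index <= 0:
--             out.append(chr(97 + p))
--         else: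
--             offs = [d for d in range(1, 27) if chr(97 + (p + d) % 26) not in skip]
--             out.append(chr(97 + (p + offs[(index - 1) % len(offs)]) % 26))
--     return "".join(out)
-- ===== Notes on version B (the rewrite author's own statement) =====
-- stated objective: faster
-- what changed: Per character B builds the 26-entry list of allowed step offsets once and jumps directly with (index-1) mod len(offs), replacing A's while loop that steps j one by one index times.
import Mathlib
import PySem

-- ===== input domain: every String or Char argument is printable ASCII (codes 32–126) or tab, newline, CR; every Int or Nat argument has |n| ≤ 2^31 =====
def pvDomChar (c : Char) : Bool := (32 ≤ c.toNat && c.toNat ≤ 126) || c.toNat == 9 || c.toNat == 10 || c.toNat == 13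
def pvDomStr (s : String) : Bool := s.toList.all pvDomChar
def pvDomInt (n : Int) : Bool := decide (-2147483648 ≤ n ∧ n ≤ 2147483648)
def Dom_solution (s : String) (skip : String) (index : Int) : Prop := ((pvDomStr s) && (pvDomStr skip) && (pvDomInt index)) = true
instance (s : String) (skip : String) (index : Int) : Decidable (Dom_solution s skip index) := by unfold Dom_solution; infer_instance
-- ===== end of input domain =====

-- B replaces A's per-character while loop (O(index) steps) by a 26-entry table of
-- allowed step offsets and a single modular jump: asymptotically faster in `index`.

-- ===== PORT A =====
-- chr(97+((ord(c)+j-97)%26)) ; Int % with positive literal divisor 26 matches Python's %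
def aLetter (c0 j : Int) : Char := Char.ofNat (97 + (c0 + j - 97) % 26).toNat

-- "chr(...) not in skip" (single-character substring test)
def aOk (skip : String) (c0 j : Int) : Bool := !(PySem.Chars.isIn [aLetter c0 j] skip.toList)

-- A's inner `while i < index` loop; the fuel argument only totalizes it (Python diverges
-- when index > 0 and every lowercase letter is in skip; such inputs are outside Pre_)
def aGo (skip : String) (index c0 : Int) : Nat → Int → Int → Int
  | 0, _, j => j
  | f+1, i, j =>
    if i < index then
      (if aOk skip c0 (j+1) then aGo skip index c0 f (i+1) (j+1)
       else aGo skip index c0 f i (j+1))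
    else j

def solution (s : String) (skip : String) (index : Int) : String :=
  String.mk (s.toList.foldl
    (fun r c => r ++ [aLetter (c.toNat : Int) (aGo skip index (c.toNat : Int) (26 * index.toNat) 0 0)]) [])

-- ===== PORT B =====
-- "chr(97 + (p + d) % 26) not in skip"
def bOk (skip : String) (p d : Int) : Bool :=
  !(PySem.Chars.isIn [Char.ofNat (97 + (p + d) % 26).toNat] skip.toList)

-- offs = [d for d in range(1, 27) if chr(97 + (p + d) % 26) not in skip]
def bOffs (skip : String) (p : Int) : List Int :=
  (PySem.List.pyRange 1 27 1).filter (fun d => bOk skip p d)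

-- one character of B's answer; offs[(index-1) % len(offs)] (in range whenever offs ≠ [];
-- the .getD 0 only totalizes the out-of-Pre_ case len(offs) = 0, where Python raises)
def bChar (skip : String) (index p : Int) : Char :=
  if index ≤ 0 then Char.ofNat (97 + p).toNat
  else
    Char.ofNat (97 + (p + (PySem.List.pyGet? (bOffs skip p)
      (PySem.Int.mod (index - 1) ((bOffs skip p).length : Int))).getD 0) % 26).toNat

def solution_alt (s : String) (skip : String) (index : Int) : String :=
  String.mk (s.toList.map (fun c => bChar skip index (((c.toNat : Int) - 97) % 26)))

-- ===== PRECONDITION & SPEC =====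
-- Pre_ excludes exactly the inputs on which A never returns (infinite while loop):
-- a nonempty s with index > 0 while every lowercase letter occurs in skip.
def Pre_solution (s : String) (skip : String) (index : Int) : Prop :=
  s.toList ≠ [] → 0 < index →
    ∃ k ∈ List.range 26, PySem.Chars.isIn [Char.ofNat (97 + k)] skip.toList = false
instance (s : String) (skip : String) (index : Int) : Decidable (Pre_solution s skip index) := by
  unfold Pre_solution; infer_instance

def pvWitness_solution : String × String × Int := ("aks", "bd", 5)

def Spec_solution (s : String) (skip : String) (index : Int) (out : String) : Prop := out = solution_alt s skip index
instance (s : String) (skip : String) (index : Int) (out : String) : Decidable (Spec_solution s skip index out) := by unfold Spec_solution; infer_instance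

-- ===== CLAIM (what is proved, stated in full; the proofs are below) =====
def Claim_equal_solution : Prop := ∀ (s : String) (skip : String) (index : Int), Dom_solution s skip index → Pre_solution s skip index → Spec_solution s skip index (solution s skip index)

-- ===== LEMMAS AND PROOFS =====

-- integer range [a, a+n) as a list, for the loop characterization
def pvRangeZ (a : Int) : Nat → List Int
  | 0 => []
  | n+1 => a :: pvRangeZ (a+1) n

theorem pvRangeZ_append (m : Nat) : ∀ (a : Int) (n : Nat),
    pvRangeZ a (m + n) = pvRangeZ a m ++ pvRangeZ (a + m) n := by
  induction m with
  | zero => intro a n; simp [pvRangeZ]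
  | succ m ih =>
    intro a n
    have h1 : m + 1 + n = (m + n) + 1 := by omega
    simp [pvRangeZ, Nat.succ_add, ih (a+1) n]
    congr 1
    omega

theorem pvRangeZ_shift (n : Nat) : ∀ (a t : Int),
    pvRangeZ (a + t) n = (pvRangeZ a n).map (· + t) := by
  induction n with
  | zero => intro a t; simp [pvRangeZ]
  | succ n ih =>
    intro a t
    simp only [pvRangeZ, List.map_cons]
    rw [show a + t + 1 = (a + 1) + t by ring, ih (a+1) t]

theorem mem_pvRangeZ (n : Nat) : ∀ (a x : Int), x ∈ pvRangeZ a n ↔ a ≤ x ∧ x < a + n := by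
  induction n with
  | zero => intro a x; simp [pvRangeZ]
  | succ n ih =>
    intro a x
    simp [pvRangeZ, ih (a+1) x]
    omega

theorem aLetter_add_26 (c0 d : Int) : aLetter c0 (d + 26) = aLetter c0 d := by
  unfold aLetter
  congr 1
  omega

theorem aLetter_add_26_mul (c0 d : Int) (t : Nat) :
    aLetter c0 (d + 26 * (t : Int)) = aLetter c0 d := by
  induction t with
  | zero => simp
  | succ t ih =>
    have h : d + 26 * ((t + 1 : Nat) : Int) = (d + 26 * (t : Int)) + 26 := by push_cast; ring
    rw [h, aLetter_add_26, ih]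

theorem aOk_add_26_mul (skip : String) (c0 d : Int) (t : Nat) :
    aOk skip c0 (d + 26 * (t : Int)) = aOk skip c0 d := by
  unfold aOk; rw [aLetter_add_26_mul]

-- when the loop guard is false the loop returns j at once
theorem aGo_done (skip : String) (index c0 : Int) (f : Nat) (i j : Int) (h : ¬ i < index) :
    aGo skip index c0 f i j = j := by
  cases f with
  | zero => rfl
  | succ f => simp [aGo, h]

-- loop characterization: aGo returns the (index - i)-th element (1-indexed) of the
-- allowed offsets strictly greater than j, read off the filtered range list
theorem aGo_eq_getD (skip : String) (index c0 : Int) : ∀ (f : Nat) (i j : Int),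
    i < index →
    (index - i).toNat ≤ ((pvRangeZ (j+1) f).filter (fun d => aOk skip c0 d)).length →
    aGo skip index c0 f i j
      = ((pvRangeZ (j+1) f).filter (fun d => aOk skip c0 d)).getD ((index - i).toNat - 1) 0 := by
  intro f
  induction f with
  | zero =>
    intro i j hi hlen
    simp [pvRangeZ] at hlen
    omega
  | succ f ih =>
    intro i j hi hlen
    rw [show pvRangeZ (j+1) (f+1) = (j+1) :: pvRangeZ (j+1+1) f from rfl] at hlen ⊢
    rw [List.filter_cons] at hlen ⊢
    by_cases hok : aOk skip c0 (j+1)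
    · rw [if_pos (by simp [hok])] at hlen ⊢
      by_cases hlast : i + 1 < index
      · have hlen' : (index - (i+1)).toNat
            ≤ ((pvRangeZ (j+1+1) f).filter (fun d => aOk skip c0 d)).length := by
          rw [List.length_cons] at hlen
          omega
        rw [show aGo skip index c0 (f+1) i j
              = aGo skip index c0 f (i+1) (j+1) by simp [aGo, hi, hok]]
        rw [ih (i+1) (j+1) hlast hlen']
        rw [show (index - i).toNat - 1 = ((index - (i+1)).toNat - 1) + 1 by omega]
        rw [List.getD_cons_succ]
      · rw [show aGo skip index c0 (f+1) i j
              = aGo skip index c0 f (i+1) (j+1) by simp [aGo, hi, hok]]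
        rw [aGo_done skip index c0 f (i+1) (j+1) hlast]
        rw [show (index - i).toNat - 1 = 0 by omega, List.getD_cons_zero]
    · rw [if_neg (by simp [hok])] at hlen ⊢
      rw [show aGo skip index c0 (f+1) i j
            = aGo skip index c0 f i (j+1) by simp [aGo, hi, hok]]
      exact ih i (j+1) hi hlen

-- one period of allowed offsets, on the A side
def pvOffs (skip : String) (c0 : Int) : List Int :=
  (pvRangeZ 1 26).filter (fun d => aOk skip c0 d)

theorem sum_map_const (K m : Nat) : ((List.range K).map (fun _ => m)).sum = K * m := by
  induction K with
  | zero => simp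
  | succ K _ => rw [List.range_succ]; simp; ring

-- the filtered 26K-range decomposes into K shifted copies of pvOffs
theorem filter_range_period (skip : String) (c0 : Int) (K : Nat) :
    (pvRangeZ 1 (26 * K)).filter (fun d => aOk skip c0 d)
      = (List.range K).flatMap (fun (t : Nat) => (pvOffs skip c0).map (fun x => x + 26 * (t : Int))) := by
  induction K with
  | zero => simp [pvRangeZ]
  | succ K ih =>
    rw [show 26 * (K + 1) = 26 * K + 26 by ring, pvRangeZ_append (26 * K) 1 26,
        List.filter_append, ih, List.range_succ, List.flatMap_append]
    congr 1
    simp only [List.flatMap_cons, List.flatMap_nil, List.append_nil]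
    rw [show (1 : Int) + ((26 * K : Nat) : Int) = 1 + 26 * (K : Int) by push_cast; ring,
        show (1 : Int) + 26 * (K : Int) = 1 + (26 * (K : Int)) by ring,
        pvRangeZ_shift 26 1 (26 * (K : Int)), List.filter_map]
    unfold pvOffs
    congr 1
    apply List.filter_congr
    intro d _
    simpa using aOk_add_26_mul skip c0 d K

theorem length_filter_range_period (skip : String) (c0 : Int) (K : Nat) :
    ((pvRangeZ 1 (26 * K)).filter (fun d => aOk skip c0 d)).length
      = K * (pvOffs skip c0).length := by
  rw [filter_range_period, List.length_flatMap]
  simp only [List.length_map]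
  exact sum_map_const K (pvOffs skip c0).length

-- indexing into the flatMap of equal-length chunks
theorem getD_flatMap_chunks (offs : List Int) (m : Nat) (hm : offs.length = m) :
    ∀ (K q r : Nat), q < K → r < m →
    ((List.range K).flatMap (fun (t : Nat) => offs.map (fun x => x + 26 * (t : Int)))).getD (q * m + r) 0
      = offs.getD r 0 + 26 * (q : Int) := by
  intro K
  induction K with
  | zero => intro q r hq hr; omega
  | succ K ih =>
    intro q r hq hr
    rw [List.range_succ, List.flatMap_append]
    simp only [List.flatMap_cons, List.flatMap_nil, List.append_nil]
    have hlen : ((List.range K).flatMap (fun (t : Nat) => offs.map (fun x => x + 26 * (t : Int)))).length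
        = K * m := by
      rw [List.length_flatMap]
      simp only [List.length_map, hm]
      exact sum_map_const K m
    by_cases hqK : q < K
    · have hlt : q * m + r < K * m := by
        calc q * m + r < q * m + m := by omega
        _ = (q + 1) * m := by ring
        _ ≤ K * m := Nat.mul_le_mul_right m (by omega)
      rw [List.getD_append _ _ _ _ (by omega)]
      exact ih q r hqK hr
    · have hqe : q = K := by omega
      subst hqe
      rw [List.getD_append_right _ _ _ _ (by omega), hlen,
          show q * m + r - q * m = r by omega]
      have hr' : r < offs.length := by omega
      rw [List.getD_eq_getElem _ _ (by simpa using hr'), List.getElem_map,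
          List.getD_eq_getElem _ _ hr']

theorem bOk_eq_aOk (skip : String) (c0 d : Int) :
    bOk skip ((c0 - 97) % 26) d = aOk skip c0 d := by
  unfold bOk aOk aLetter
  rw [show 97 + ((c0 - 97) % 26 + d) % 26 = 97 + (c0 + d - 97) % 26 by omega]

theorem bOffs_eq_pvOffs (skip : String) (c0 : Int) :
    bOffs skip ((c0 - 97) % 26) = pvOffs skip c0 := by
  unfold bOffs pvOffs
  rw [show PySem.List.pyRange 1 27 1 = pvRangeZ 1 26 by decide]
  exact List.filter_congr (fun d _ => bOk_eq_aOk skip c0 d)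

-- Pre_'s witness letter yields a nonempty allowed-offset list
theorem pvOffs_length_pos (skip : String) (c0 : Int)
    (hall : ∃ k ∈ List.range 26, PySem.Chars.isIn [Char.ofNat (97 + k)] skip.toList = false) :
    0 < (pvOffs skip c0).length := by
  obtain ⟨k, hkmem, hkfalse⟩ := hall
  have hk26 : k < 26 := List.mem_range.mp hkmem
  have hmem : (26 - (c0 - 97 - (k : Int)) % 26) ∈ pvRangeZ 1 26 := by
    rw [mem_pvRangeZ]
    omega
  have hlet : aLetter c0 (26 - (c0 - 97 - (k : Int)) % 26) = Char.ofNat (97 + k) := by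
    unfold aLetter
    congr 1
    omega
  have hok : aOk skip c0 (26 - (c0 - 97 - (k : Int)) % 26) = true := by
    unfold aOk
    rw [hlet, hkfalse]
    rfl
  exact List.length_pos_of_mem (List.mem_filter.mpr ⟨hmem, hok⟩)

-- one character, index ≤ 0: the while loop does not run
theorem bChar_eq_nonpos (skip : String) (index c0 : Int) (h : index ≤ 0) :
    bChar skip index ((c0 - 97) % 26)
      = aLetter c0 (aGo skip index c0 (26 * index.toNat) 0 0) := by
  rw [show index.toNat = 0 by omega]
  rw [show aGo skip index c0 (26 * 0) 0 0 = 0 from rfl]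
  unfold bChar
  rw [if_pos h]
  unfold aLetter
  congr 1
  omega

-- one character, index > 0: loop characterization + periodic decomposition + indexing
theorem bChar_eq_pos (skip : String) (index c0 : Int) (hidx : 0 < index)
    (hall : ∃ k ∈ List.range 26, PySem.Chars.isIn [Char.ofNat (97 + k)] skip.toList = false) :
    bChar skip index ((c0 - 97) % 26)
      = aLetter c0 (aGo skip index c0 (26 * index.toNat) 0 0) := by
  have hm : 0 < (pvOffs skip c0).length := pvOffs_length_pos skip c0 hall
  set offs := pvOffs skip c0 with hoffs_def
  set m := offs.length with hm_def
  set K := index.toNat with hK_def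
  have hK1 : 1 ≤ K := by omega
  set n := K - 1 with hn_def
  set q := n / m with hq_def
  set r := n % m with hr_def
  have hq : q < K := by
    have := Nat.div_le_self n m
    omega
  have hr : r < m := Nat.mod_lt _ hm
  have hnqr : n = q * m + r := by
    rw [hq_def, hr_def, Nat.mul_comm]
    exact (Nat.div_add_mod n m).symm
  -- the loop returns the n-th (0-based) allowed offset
  have hgo : aGo skip index c0 (26 * K) 0 0 = offs.getD r 0 + 26 * (q : Int) := by
    have hlen : ((pvRangeZ ((0:Int)+1) (26 * K)).filter (fun d => aOk skip c0 d)).length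
        = K * m := by
      rw [show ((0:Int)+1) = 1 by norm_num]
      exact length_filter_range_period skip c0 K
    have hle : (index - 0).toNat ≤ ((pvRangeZ ((0:Int)+1) (26 * K)).filter
        (fun d => aOk skip c0 d)).length := by
      rw [hlen]
      have : K ≤ K * m := Nat.le_mul_of_pos_right K hm
      omega
    rw [aGo_eq_getD skip index c0 (26 * K) 0 0 (by omega) hle]
    rw [show ((0:Int)+1) = 1 by norm_num, show (index - 0).toNat - 1 = n by omega]
    rw [filter_range_period skip c0 K, hnqr]
    exact getD_flatMap_chunks offs m rfl K q r hq hr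
  rw [hgo, aLetter_add_26_mul]
  unfold bChar
  rw [if_neg (by omega)]
  rw [bOffs_eq_pvOffs skip c0, ← hoffs_def, ← hm_def]
  rw [PySem.Int.mod_eq_emod_of_pos (by exact_mod_cast hm)]
  rw [show index - 1 = ((n : Nat) : Int) by omega]
  rw [← Int.natCast_mod, ← hr_def, PySem.List.pyGet?_natCast]
  rw [← List.getD_eq_getElem?_getD]
  unfold aLetter
  congr 1
  omega

-- ===== VERDICT (by name: the statement is the Claim_ definition above) =====
theorem solution_spec : Claim_equal_solution := by
  unfold Claim_equal_solution
  intro s skip index _ hpre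
  unfold Spec_solution solution solution_alt
  rw [PySem.List.foldl_append_singleton_eq_map, List.nil_append]
  by_cases hnil : s.toList = []
  · rw [hnil]; rfl
  · congr 1
    apply List.map_congr_left
    intro c _
    by_cases hidx : index ≤ 0
    · exact (bChar_eq_nonpos skip index (c.toNat : Int) hidx).symm
    · exact (bChar_eq_pos skip index (c.toNat : Int) (by omega) (hpre hnil (by omega))).symm
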